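-- pv_equiv track=rewrite | github.com/Tanxinxin00/Bioinformatics-algorithms | AntiBiotics.py | CycloSubMass
-- ===== SOURCE A (Python) =====
-- def CycloSubMass(Masstide:list[int]) -> list[str]:
--     n=len(Masstide)
--     subtides=[[0]]
--     for k in range (1, n, 1):
--         for i in range (n):
--             if i+k-1<n:
--                 subtide=Masstide[i:i+k]
--             else:
--                 subtide=Masstide[i:]
--                 subtide.extend(Masstide[:i+k-n])
--             subtides.append(subtide)
--     subtides.append(Masstide)
--     return subtides
-- ===== SOURCE B (Python) =====
-- def CycloSubMass(Masstide: list[int]) -> list[str]: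
--     # Build every rotation of the peptide, take its proper prefixes (lengths 1..n-1),
--     # then transpose that table with zip so windows come out grouped by length.
--     n = len(Masstide)
--     prefix_rows = []
--     for i in range(n):
--         rot = Masstide[i:] + Masstide[:i]
--         prefix_rows.append([rot[:k] for k in range(1, n)])
--     subtides = [[0]]
--     for column in zip(*prefix_rows):
--         subtides.extend(column)
--     subtides.append(Masstide)
--     return subtides
-- ===== Notes on version B (the rewrite author's own statement) =====
-- stated objective: alternative
-- what changed: Instead of slicing each window with a wrap-around if/else inside a k/i loop nest, B builds the prefix table of every rotation of the peptide (rotation i -> its prefixes of lengths 1..n-1) and transposes that table with zip(*rows) to emit the windows grouped by length.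
import Mathlib
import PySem

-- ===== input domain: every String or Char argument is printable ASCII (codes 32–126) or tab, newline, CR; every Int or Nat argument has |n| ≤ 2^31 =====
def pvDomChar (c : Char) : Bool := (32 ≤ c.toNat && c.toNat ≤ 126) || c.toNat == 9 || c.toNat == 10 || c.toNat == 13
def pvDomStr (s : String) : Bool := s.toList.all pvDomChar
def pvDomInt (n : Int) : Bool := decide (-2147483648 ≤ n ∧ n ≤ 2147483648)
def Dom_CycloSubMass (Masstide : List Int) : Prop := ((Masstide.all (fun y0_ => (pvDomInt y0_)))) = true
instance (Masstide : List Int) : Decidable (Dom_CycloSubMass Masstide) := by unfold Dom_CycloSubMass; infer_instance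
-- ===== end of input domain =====

-- B builds the prefix table of all rotations and transposes it with zip, instead of
-- A's per-window wrap-around slicing; objective: alternative decomposition, same cost.
-- (Python A appends the argument list itself as the last element; the equivalence here
-- is about the return VALUE, not aliasing.)

-- ===== PORT A =====
def CycloSubMass (Masstide : List Int) : List (List Int) :=
  let n : Int := Masstide.length
  let subtides : List (List Int) :=
    (PySem.List.pyRange 1 n 1).foldl (fun acc k =>
      (PySem.List.pyRange 0 n 1).foldl (fun acc i =>
        let subtide : List Int :=
          if i + k - 1 < n then
            PySem.List.slice Masstide (some i) (some (i + k))
          else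
            PySem.List.slice Masstide (some i) none ++
              PySem.List.slice Masstide none (some (i + k - n))
        acc ++ [subtide]) acc) [[0]]
  subtides ++ [Masstide]

-- ===== PORT B =====
-- pvPop / pvZipGo / pvZipStar transcribe Python's builtin zip(*rows): take one element
-- off the head of every row while all rows are nonempty (exact: zip stops at the
-- shortest row; the fuel = length of the first row is an upper bound on the steps,
-- and when it runs out the first row is empty so zip would stop anyway).
def pvPop {α : Type} : List α → Option (α × List α)
  | [] => none
  | a :: as => some (a, as)

def pvZipGo {α : Type} : Nat → List (List α) → List (List α)
  | 0, _ => []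
  | fuel + 1, rows =>
    match rows.mapM pvPop with
    | none => []
    | some pairs => pairs.map Prod.fst :: pvZipGo fuel (pairs.map Prod.snd)

def pvZipStar {α : Type} (rows : List (List α)) : List (List α) :=
  match rows with
  | [] => []
  | r :: _ => pvZipGo r.length rows

def CycloSubMass_alt (Masstide : List Int) : List (List Int) :=
  let n : Int := Masstide.length
  let prefixRows : List (List (List Int)) :=
    (PySem.List.pyRange 0 n 1).map (fun i =>
      let rot : List Int :=
        PySem.List.slice Masstide (some i) none ++ PySem.List.slice Masstide none (some i)
      (PySem.List.pyRange 1 n 1).map (fun k => PySem.List.slice rot none (some k)))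
  ((pvZipStar prefixRows).foldl (fun acc column => acc ++ column) [[0]]) ++ [Masstide]

-- ===== PRECONDITION & SPEC =====
def Spec_CycloSubMass (Masstide : List Int) (out : List (List Int)) : Prop := out = CycloSubMass_alt Masstide
instance (Masstide : List Int) (out : List (List Int)) : Decidable (Spec_CycloSubMass Masstide out) := by unfold Spec_CycloSubMass; infer_instance

-- ===== CLAIM (what is proved, stated in full; the proofs are below) =====
def Claim_equal_CycloSubMass : Prop := ∀ (Masstide : List Int), Dom_CycloSubMass Masstide → Spec_CycloSubMass Masstide (CycloSubMass Masstide)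

-- ===== LEMMAS AND PROOFS =====

-- popping one element off every row of a rectangular grid
lemma mapM_pop_grid {α β : Type} (is : List β) (g : β → α) (t : β → List α) :
    (is.map (fun i => g i :: t i)).mapM pvPop = some (is.map (fun i => (g i, t i))) := by
  induction is with
  | nil => rfl
  | cons i is ih => simp [List.mapM_cons, ih, pvPop, pure, Option.bind]

-- zip(*·) of a nonempty rectangular grid is its transpose
lemma zipGo_grid {α β γ : Type} (ks : List γ) (is : List β) (f : β → γ → α) :
    pvZipGo ks.length (is.map (fun i => (ks.map (f i)))) =
      ks.map (fun k => is.map (fun i => f i k)) := by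
  induction ks with
  | nil => rfl
  | cons k ks ih =>
    have hrw : (is.map (fun i => (k :: ks).map (f i))) =
        is.map (fun i => f i k :: ks.map (f i)) := by simp
    rw [List.length_cons, hrw]
    show pvZipGo (ks.length + 1) _ = _
    rw [pvZipGo, mapM_pop_grid]
    simp only [List.map_map, Function.comp_def]
    rw [ih]
    rfl

lemma zipStar_grid {α β γ : Type} (ks : List γ) (is : List β) (f : β → γ → α) (h : is ≠ []) :
    pvZipStar (is.map (fun i => (ks.map (f i)))) =
      ks.map (fun k => is.map (fun i => f i k)) := by
  obtain ⟨i0, is', rfl⟩ := List.exists_cons_of_ne_nil h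
  have : ((i0 :: is').map (fun i => (ks.map (f i)))) =
      (ks.map (f i0)) :: is'.map (fun i => (ks.map (f i))) := by simp
  rw [this]
  show pvZipGo (ks.map (f i0)).length _ = _
  rw [List.length_map, ← zipGo_grid ks (i0 :: is') f]
  simp

-- the per-window equality: A's wrap-around branch equals the k-prefix of rotation i
lemma window_eq (M : List Int) (k i : Int) (hk1 : 1 ≤ k) (hk : k < (M.length : Int))
    (hi0 : 0 ≤ i) (hi : i < (M.length : Int)) :
    (if i + k - 1 < (M.length : Int) then
        PySem.List.slice M (some i) (some (i + k))
      else
        PySem.List.slice M (some i) none ++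
          PySem.List.slice M none (some (i + k - (M.length : Int)))) =
    PySem.List.slice
      (PySem.List.slice M (some i) none ++ PySem.List.slice M none (some i))
      none (some k) := by
  rw [PySem.List.slice_from M hi0, PySem.List.slice_to M hi0,
    PySem.List.slice_to _ (by omega : (0:Int) ≤ k)]
  split_ifs with h
  · -- non-wrapping window: i + k ≤ length
    rw [PySem.List.slice_toNat M hi0 (by omega)]
    rw [List.take_append_of_le_length (by simp [List.length_drop]; omega)]
    congr 1
    omega
  · -- wrapping window
    rw [PySem.List.slice_to M (by omega : (0:Int) ≤ i + k - (M.length : Int))]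
    have hlen : k.toNat = (M.drop i.toNat).length + (i + k - (M.length : Int)).toNat := by
      simp [List.length_drop]; omega
    rw [hlen, List.take_append, Nat.add_sub_cancel_left, List.take_take]
    rw [List.take_of_length_le (Nat.le_add_right _ _)]
    rw [Nat.min_eq_left (by clear hlen; omega)]

theorem CycloSubMass_spec : Claim_equal_CycloSubMass := by
  intro M _
  unfold Spec_CycloSubMass CycloSubMass CycloSubMass_alt
  simp only
  congr 1
  rcases M with _ | ⟨a, M'⟩
  · decide
  set M := a :: M' with hM
  have hne : PySem.List.pyRange 0 (M.length : Int) 1 ≠ [] := by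
    rw [PySem.List.pyRange_one_cons (by simp [hM])]
    simp
  -- B side: zip of the rotation-prefix grid is the k-major transpose of the windows
  rw [zipStar_grid _ _ _ hne,
    PySem.List.foldl_append_eq_flatMap (g := fun col => col)]
  -- A side: flatten the append loops into the same flatMap, window by window
  refine Eq.trans (Eq.trans (PySem.List.foldl_congr_mem _ _ _ _ ?_)
    (PySem.List.foldl_append_eq_flatMap
      (g := fun k => (PySem.List.pyRange 0 (M.length : Int) 1).map (fun i =>
        PySem.List.slice
          (PySem.List.slice M (some i) none ++ PySem.List.slice M none (some i))
          none (some k))) ..)) ?_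
  · intro acc k hkmem
    rw [PySem.List.mem_pyRange_one] at hkmem
    refine Eq.trans (PySem.List.foldl_congr_mem _ _
      (fun acc i => acc ++ [PySem.List.slice
        (PySem.List.slice M (some i) none ++ PySem.List.slice M none (some i))
        none (some k)]) _ ?_)
      (PySem.List.foldl_append_singleton_eq_map ..)
    intro acc i himem
    rw [PySem.List.mem_pyRange_one] at himem
    simp only
    rw [window_eq M k i hkmem.1 hkmem.2 himem.1 himem.2]
  · simp [List.flatMap_def, Function.comp_def]
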